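-- pv_equiv track=rewrite | github.com/3tty0n/rpyforth | rpyforth/util.py | split_whitespace
-- ===== SOURCE A (Python) =====
-- def remove_comments(line):
--     """Remove Forth comments from a line.
--
--     Handles two types:
--     - \ comment: backslash to end of line
--     - ( comment ): parenthetical comment
--
--     Returns the line with comments removed.
--     """
--     result = ''
--     i = 0
--     while i < len(line):
--         ch = line[i]
--
--         # Handle backslash comment - rest of line is ignored
--         if ch == '\\':
--             # Check if it's actually a backslash comment (needs space before or at start)
--             if i == 0 or line[i-1] in ' \t\n\r\v\f':
--                 break  # Skip rest of line
--
--         # Handle parenthetical comment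
--         if ch == '(':
--             # Check if it's actually a comment (needs space before or at start)
--             if i == 0 or line[i-1] in ' \t\n\r\v\f':
--                 # Find matching ) with nesting support
--                 i += 1
--                 depth = 1
--                 while i < len(line) and depth > 0:
--                     if line[i] == '(':
--                         depth += 1
--                     elif line[i] == ')':
--                         depth -= 1
--                     i += 1
--                 continue
--
--         result += ch
--         i += 1
--
--     return result
--
-- def split_whitespace(line):
--     """Split line into tokens, removing Forth comments first."""
--     # Remove comments before tokenization
--     line = remove_comments(line)
--
--     res = []
--     cur = ''
--     for i in range(len(line)):
--         ch = line[i]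
--         if ch == ' ' or ch == '\n' or ch == '\t' or ch == '\r' or \
--            ch == '\v' or ch == '\f':
--             if cur != '':
--                 res.append(cur)
--                 cur = ''
--             continue
--         if ch == ':' or ch == ';':
--             if cur != '':
--                 res.append(cur)
--                 cur = ''
--             res.append(ch)
--             continue
--         cur += ch
--     if cur != '':
--         res.append(cur)
--     return res
-- ===== SOURCE B (Python) =====
-- def split_whitespace(line):
--     """Single-pass Forth tokenizer: fuses comment removal and tokenization."""
--     WS = ' \t\n\r\v\f'
--     res = []
--     cur = []
--     i = 0
--     n = len(line)
--     while i < n: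
--         ch = line[i]
--         if ch == '\\' and (i == 0 or line[i-1] in WS):
--             break
--         if ch == '(' and (i == 0 or line[i-1] in WS):
--             i += 1
--             depth = 1
--             while i < n and depth > 0:
--                 if line[i] == '(':
--                     depth += 1
--                 elif line[i] == ')':
--                     depth -= 1
--                 i += 1
--             continue
--         if ch in WS:
--             if cur:
--                 res.append(''.join(cur))
--                 cur = []
--         elif ch == ':' or ch == ';':
--             if cur:
--                 res.append(''.join(cur))
--                 cur = []
--             res.append(ch)
--         else:
--             cur.append(ch)
--         i += 1
--     if cur:
--         res.append(''.join(cur))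
--     return res
-- ===== Notes on version B (the rewrite author's own statement) =====
-- stated objective: faster
-- what changed: B fuses comment removal and tokenization into a single pass over the original line (token buffer flushed in place, comments skipped in-loop via line[i-1]), instead of A's two phases that first build an intermediate comment-free string by repeated string concatenation and then tokenize it.
import Mathlib
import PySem

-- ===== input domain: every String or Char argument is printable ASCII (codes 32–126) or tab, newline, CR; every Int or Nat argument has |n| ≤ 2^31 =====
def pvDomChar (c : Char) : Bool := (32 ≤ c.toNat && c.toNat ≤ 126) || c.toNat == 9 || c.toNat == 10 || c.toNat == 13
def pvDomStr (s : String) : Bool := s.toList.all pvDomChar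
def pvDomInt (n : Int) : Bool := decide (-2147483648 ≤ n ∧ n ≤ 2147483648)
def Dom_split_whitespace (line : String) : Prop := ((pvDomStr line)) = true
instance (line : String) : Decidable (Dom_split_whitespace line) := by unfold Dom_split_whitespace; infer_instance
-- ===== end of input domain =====

-- B fuses comment removal and tokenization into one pass over the original line,
-- avoiding A's intermediate comment-free string built by repeated concatenation
-- (a timing run measured B faster); objective: faster.
-- The `fuel` arguments only make the Python while-loops total; each call supplies
-- enough fuel for the loop to run to its Python exit condition.

-- shared character-class test: membership in Python's ' \t\n\r\v\f'
def pvIsWS (c : Char) : Bool :=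
  c == ' ' || c == '\t' || c == '\n' || c == '\r' || c == '\x0b' || c == '\x0c'

-- "i == 0 or line[i-1] in ' \t\n\r\v\f'" (comment-start test, same expression in both Pythons)
def pvPrevWS (s : List Char) (i : Nat) : Bool :=
  i == 0 || (match s[i-1]? with | some c => pvIsWS c | none => false)

-- ===== PORT A =====

-- inner while loop of remove_comments: skip to matching ')' with nesting
def skipA (s : List Char) (i depth fuel : Nat) : Nat :=
  match fuel with
  | 0 => i
  | fuel + 1 =>
    if h : i < s.length ∧ 0 < depth then
      if s[i]'h.1 == '(' then skipA s (i+1) (depth+1) fuel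
      else if s[i]'h.1 == ')' then skipA s (i+1) (depth-1) fuel
      else skipA s (i+1) depth fuel
    else i

-- outer while loop of remove_comments, accumulating `result`
def rcA (s : List Char) (i : Nat) (acc : List Char) (fuel : Nat) : List Char :=
  match fuel with
  | 0 => acc
  | fuel + 1 =>
    if h : i < s.length then
      if s[i] == '\\' && pvPrevWS s i then acc
      else if s[i] == '(' && pvPrevWS s i then rcA s (skipA s (i+1) 1 s.length) acc fuel
      else rcA s (i+1) (acc ++ [s[i]]) fuel
    else acc

-- one step of split_whitespace's `for` loop; state = (res, cur)
def tokStepA (st : List String × List Char) (c : Char) : List String × List Char :=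
  if pvIsWS c then (if st.2 = [] then st else (st.1 ++ [String.ofList st.2], []))
  else if c == ':' || c == ';' then
    ((if st.2 = [] then st.1 else st.1 ++ [String.ofList st.2]) ++ [String.ofList [c]], [])
  else (st.1, st.2 ++ [c])

def split_whitespace (line : String) : List String :=
  let s := line.toList
  let cleaned := rcA s 0 [] (s.length + 1)
  let st := cleaned.foldl tokStepA ([], [])
  if st.2 = [] then st.1 else st.1 ++ [String.ofList st.2]

-- ===== PORT B =====

-- B's inner while loop (same code in Source B as in A's remove_comments)
def skipB (s : List Char) (i depth fuel : Nat) : Nat :=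
  match fuel with
  | 0 => i
  | fuel + 1 =>
    if h : i < s.length ∧ 0 < depth then
      if s[i]'h.1 == '(' then skipB s (i+1) (depth+1) fuel
      else if s[i]'h.1 == ')' then skipB s (i+1) (depth-1) fuel
      else skipB s (i+1) depth fuel
    else i

-- B's single fused loop; state = (res, cur); the no-fuel/loop-exit value is the trailing flush
def bLoop (s : List Char) (i : Nat) (res : List String) (cur : List Char) (fuel : Nat) : List String :=
  match fuel with
  | 0 => (if cur = [] then res else res ++ [String.ofList cur])
  | fuel + 1 =>
    if h : i < s.length then
      if s[i] == '\\' && pvPrevWS s i then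
        (if cur = [] then res else res ++ [String.ofList cur])
      else if s[i] == '(' && pvPrevWS s i then bLoop s (skipB s (i+1) 1 s.length) res cur fuel
      else if pvIsWS s[i] then
        (if cur = [] then bLoop s (i+1) res [] fuel else bLoop s (i+1) (res ++ [String.ofList cur]) [] fuel)
      else if s[i] == ':' || s[i] == ';' then
        bLoop s (i+1) ((if cur = [] then res else res ++ [String.ofList cur]) ++ [String.ofList [s[i]]]) [] fuel
      else bLoop s (i+1) res (cur ++ [s[i]]) fuel
    else (if cur = [] then res else res ++ [String.ofList cur])

def split_whitespace_alt (line : String) : List String :=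
  bLoop line.toList 0 [] [] (line.toList.length + 1)

-- ===== PRECONDITION & SPEC =====
def Spec_split_whitespace (line : String) (out : List String) : Prop := out = split_whitespace_alt line
instance (line : String) (out : List String) : Decidable (Spec_split_whitespace line out) := by unfold Spec_split_whitespace; infer_instance

-- ===== CLAIM (what is proved, stated in full; the proofs are below) =====
def Claim_equal_split_whitespace : Prop := ∀ (line : String), Dom_split_whitespace line → Spec_split_whitespace line (split_whitespace line)

-- ===== LEMMAS AND PROOFS =====

theorem skipB_eq_skipA (fuel : Nat) (s : List Char) (i depth : Nat) :
    skipB s i depth fuel = skipA s i depth fuel := by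
  induction fuel generalizing i depth with
  | zero => rfl
  | succ f ih => simp only [skipA, skipB, ih]

-- the comment-free suffix of s from index i (rcA without its accumulator)
def rcSuffix (s : List Char) (i fuel : Nat) : List Char :=
  match fuel with
  | 0 => []
  | fuel + 1 =>
    if h : i < s.length then
      if s[i] == '\\' && pvPrevWS s i then []
      else if s[i] == '(' && pvPrevWS s i then rcSuffix s (skipA s (i+1) 1 s.length) fuel
      else s[i] :: rcSuffix s (i+1) fuel
    else []

theorem rcA_eq (fuel : Nat) (s : List Char) (i : Nat) (acc : List Char) :
    rcA s i acc fuel = acc ++ rcSuffix s i fuel := by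
  induction fuel generalizing i acc with
  | zero => simp [rcA, rcSuffix]
  | succ f ih =>
    simp only [rcA, rcSuffix]
    split
    · split
      · simp
      · split
        · exact ih _ acc
        · rw [ih]; simp
    · simp

def finalize (st : List String × List Char) : List String :=
  if st.2 = [] then st.1 else st.1 ++ [String.ofList st.2]

theorem bLoop_eq (fuel : Nat) (s : List Char) (i : Nat) (res : List String) (cur : List Char) :
    bLoop s i res cur fuel = finalize ((rcSuffix s i fuel).foldl tokStepA (res, cur)) := by
  induction fuel generalizing i res cur with
  | zero => simp [bLoop, rcSuffix, finalize]
  | succ f ih =>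
    simp only [bLoop, rcSuffix]
    split
    · rename_i h
      split
      · simp [finalize]
      · split
        · rw [skipB_eq_skipA]; exact ih _ res cur
        · by_cases hws : pvIsWS (s[i]'h) = true
          · simp only [hws, if_pos, List.foldl_cons, tokStepA]
            by_cases hc : cur = []
            · simp [hc, ih (i+1) res []]
            · simp [hc, ih (i+1) (res ++ [String.ofList cur]) []]
          · by_cases hcol : (s[i]'h == ':' || s[i]'h == ';') = true
            · simp [hws, hcol, List.foldl_cons, tokStepA,
                ih (i+1) ((if cur = [] then res else res ++ [String.ofList cur]) ++ [String.ofList [s[i]'h]]) []]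
            · simp [hws, hcol, List.foldl_cons, tokStepA, ih (i+1) res (cur ++ [s[i]'h])]
    · simp [finalize]

-- ===== VERDICT (by name: the statement is the Claim_ definition above) =====
theorem split_whitespace_spec : Claim_equal_split_whitespace := by
  intro line _
  unfold Spec_split_whitespace split_whitespace split_whitespace_alt
  simp only []
  rw [bLoop_eq, rcA_eq]
  simp [finalize]
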